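-- pv_equiv track=rewrite | github.com/kgw012/TIL | 0911/kakao/problem01.py | solution
-- ===== SOURCE A (Python) =====
-- def solution(id_list, report, k):
--     report_dict = dict()
--     id_dict = dict()
--     for report_tmp in report:
--         id, rep = report_tmp.split()
--
--         if id in id_dict:
--             id_dict[id].add(rep)
--         else:
--             id_dict[id] = set()
--             id_dict[id].add(rep)
--
--         if rep in report_dict:
--             report_dict[rep].add(id)
--         else:
--             report_dict[rep] = set()
--             report_dict[rep].add(id)
--
--     answer = []
--     for id in id_list:
--         cnt = 0
--         if id in id_dict:
--             for rep in id_dict[id]: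
--                 if len(report_dict.get(rep, 0)) >= k:
--                     cnt += 1
--         answer.append(cnt)
--
--     return answer
-- ===== SOURCE B (Python) =====
-- def solution(id_list, report, k):
--     pairs = set()
--     reporters = {}
--     for line in report:
--         rid, target = line.split()
--         pairs.add((rid, target))
--         reporters.setdefault(target, set()).add(rid)
--     banned = {t for t, s in reporters.items() if len(s) >= k}
--     count = {}
--     for rid, target in pairs:
--         if target in banned:
--             count[rid] = count.get(rid, 0) + 1
--     return [count.get(i, 0) for i in id_list]
-- ===== Notes on version B (the rewrite author's own statement) =====
-- stated objective: alternative
-- what changed: Replaces A's per-reporter dict of target sets and its nested per-id loop with a precomputed banned-target set plus one counting pass over a deduplicated (reporter,target) pair set, read back with count.get in id_list order.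
import Mathlib
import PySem

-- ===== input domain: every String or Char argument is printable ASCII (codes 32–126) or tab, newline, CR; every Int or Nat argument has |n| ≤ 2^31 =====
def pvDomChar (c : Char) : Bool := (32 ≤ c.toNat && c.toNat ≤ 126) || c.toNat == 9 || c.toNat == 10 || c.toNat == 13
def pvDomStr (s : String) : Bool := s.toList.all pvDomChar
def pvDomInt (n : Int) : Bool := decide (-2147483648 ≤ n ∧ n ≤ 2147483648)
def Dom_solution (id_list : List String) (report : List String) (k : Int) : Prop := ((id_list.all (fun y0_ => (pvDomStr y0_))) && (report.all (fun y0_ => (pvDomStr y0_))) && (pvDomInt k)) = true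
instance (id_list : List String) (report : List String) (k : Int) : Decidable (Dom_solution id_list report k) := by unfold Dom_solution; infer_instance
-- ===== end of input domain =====

-- B replaces A's per-reporter dict of target sets and nested per-id loop by a banned-target
-- set plus one counting pass over a deduplicated (reporter, target) pair set (alternative
-- decomposition, similar cost). Equivalence of RETURN values is what is proved.

-- ===== PORT A =====
-- A's 'if id in id_dict: id_dict[id].add(rep) else: id_dict[id] = set(); id_dict[id].add(rep)'
def pvUpdIdDict (idd : PySem.Dict String (PySem.Set String)) (id rep : String) :
    PySem.Dict String (PySem.Set String) :=
  if idd.contains id then idd.insert id (PySem.Set.add (idd.getD id PySem.Set.empty) rep)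
  else idd.insert id (PySem.Set.add PySem.Set.empty rep)

-- A's 'if rep in report_dict: report_dict[rep].add(id) else: report_dict[rep] = set(); report_dict[rep].add(id)'
def pvUpdRepDict (rd : PySem.Dict String (PySem.Set String)) (id rep : String) :
    PySem.Dict String (PySem.Set String) :=
  if rd.contains rep then rd.insert rep (PySem.Set.add (rd.getD rep PySem.Set.empty) id)
  else rd.insert rep (PySem.Set.add PySem.Set.empty id)

-- one iteration of A's report loop; state = (report_dict, id_dict)
def pvStepA (st : PySem.Dict String (PySem.Set String) × PySem.Dict String (PySem.Set String))
    (report_tmp : String) :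
    PySem.Dict String (PySem.Set String) × PySem.Dict String (PySem.Set String) :=
  match PySem.Str.split₀ report_tmp with
  | [id, rep] => (pvUpdRepDict st.1 id rep, pvUpdIdDict st.2 id rep)
  | _ => st    -- 'id, rep = report_tmp.split()' raises ValueError here; excluded by Pre_solution

-- A's inner loop body for one id: 'cnt = 0; if id in id_dict: for rep in id_dict[id]: …'
-- ('for rep in …' iterates a Python set; cnt is independent of that iteration order.
--  'report_dict.get(rep, 0)' never takes the default: every rep in id_dict[id] is a key.)
def pvCntFor (report_dict id_dict : PySem.Dict String (PySem.Set String)) (k : Int)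
    (id : String) : Int :=
  if id_dict.contains id then
    (id_dict.getD id PySem.Set.empty).foldl
      (fun cnt rep =>
        if PySem.Set.len (report_dict.getD rep PySem.Set.empty) ≥ k then cnt + 1 else cnt) 0
  else 0

def solution (id_list : List String) (report : List String) (k : Int) : List Int :=
  let dicts := report.foldl pvStepA (PySem.Dict.empty, PySem.Dict.empty)
  id_list.foldl (fun answer id => answer ++ [pvCntFor dicts.1 dicts.2 k id]) []

-- ===== PORT B =====
-- B's 'reporters.setdefault(target, set()).add(rid)'
def pvUpdRepB (rd : PySem.Dict String (PySem.Set String)) (rid target : String) :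
    PySem.Dict String (PySem.Set String) :=
  let rd' := rd.setdefault target PySem.Set.empty
  rd'.insert target (PySem.Set.add (rd'.getD target PySem.Set.empty) rid)

-- one iteration of B's report loop; state = (pairs, reporters)
def pvStepB (st : PySem.Set (String × String) × PySem.Dict String (PySem.Set String))
    (line : String) :
    PySem.Set (String × String) × PySem.Dict String (PySem.Set String) :=
  match PySem.Str.split₀ line with
  | [rid, target] => (PySem.Set.add st.1 (rid, target), pvUpdRepB st.2 rid target)
  | _ => st    -- 'rid, target = line.split()' raises ValueError here; excluded by Pre_solution

def solution_alt (id_list : List String) (report : List String) (k : Int) : List Int :=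
  let st := report.foldl pvStepB (PySem.Set.empty, PySem.Dict.empty)
  -- banned = {t for t, s in reporters.items() if len(s) >= k}
  let banned : PySem.Set String :=
    PySem.Set.ofList ((st.2.items.filter (fun ts => PySem.Set.len ts.2 ≥ k)).map (·.1))
  -- one counting pass over the pair set (count only looked up afterwards: order-independent)
  let count : PySem.Dict String Int :=
    st.1.foldl
      (fun c pr =>
        if PySem.Set.contains banned pr.2 then c.insert pr.1 (c.getD pr.1 0 + 1) else c)
      PySem.Dict.empty
  id_list.map (fun i => count.getD i 0)

-- ===== PRECONDITION & SPEC =====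
-- Pre_ excludes exactly the inputs where A raises ValueError: a report entry that does not
-- split into exactly two whitespace-separated words ('id, rep = report_tmp.split()').
def Pre_solution (id_list : List String) (report : List String) (k : Int) : Prop :=
  ∀ s ∈ report, (PySem.Str.split₀ s).length = 2
instance (id_list : List String) (report : List String) (k : Int) : Decidable (Pre_solution id_list report k) := by unfold Pre_solution; infer_instance

def pvWitness_solution : List String × List String × Int := (["muzi", "frodo"], ["muzi frodo", "apeach frodo"], 2)

def Spec_solution (id_list : List String) (report : List String) (k : Int) (out : List Int) : Prop := out = solution_alt id_list report k
instance (id_list : List String) (report : List String) (k : Int) (out : List Int) : Decidable (Spec_solution id_list report k out) := by unfold Spec_solution; infer_instance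

-- ===== CLAIM (what is proved, stated in full; the proofs are below) =====
def Claim_equal_solution : Prop := ∀ (id_list : List String) (report : List String) (k : Int), Dom_solution id_list report k → Pre_solution id_list report k → Spec_solution id_list report k (solution id_list report k)

-- ===== LEMMAS AND PROOFS =====

-- the (reporter, target) pair carried by one report line (defined on Pre_'s lines)
def pvPairOf (s : String) : String × String :=
  match PySem.Str.split₀ s with
  | [a, b] => (a, b)
  | _ => ("", "")

-- targets reported by x / reporters of t, with multiplicity, in report order
def pvT (ps : List (String × String)) (x : String) : List String :=
  (ps.filter (fun p => p.1 == x)).map (·.2)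
def pvR (ps : List (String × String)) (t : String) : List String :=
  (ps.filter (fun p => p.2 == t)).map (·.1)

lemma pvLen2 {α : Type} {l : List α} (h : l.length = 2) : ∃ a b, l = [a, b] := by
  match l with
  | [a, b] => exact ⟨a, b, rfl⟩
  | [] | [_] | _ :: _ :: _ :: _ => simp at h

lemma pvFoldSplit {σ : Type} (g : σ → String × String → σ) (step : σ → String → σ)
    (hstep : ∀ st s, (PySem.Str.split₀ s).length = 2 → step st s = g st (pvPairOf s)) :
    ∀ (report : List String) (init : σ), (∀ s ∈ report, (PySem.Str.split₀ s).length = 2) →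
      report.foldl step init = (report.map pvPairOf).foldl g init := by
  intro report
  induction report with
  | nil => intro init _; rfl
  | cons s rest ih =>
      intro init h
      simp only [List.foldl_cons, List.map_cons]
      rw [hstep init s (h s (by simp))]
      exact ih _ (fun x hx => h x (by simp [hx]))

lemma pvStepA_eq (st : PySem.Dict String (PySem.Set String) × PySem.Dict String (PySem.Set String))
    (s : String) (h : (PySem.Str.split₀ s).length = 2) :
    pvStepA st s = (pvUpdRepDict st.1 (pvPairOf s).1 (pvPairOf s).2,
                    pvUpdIdDict st.2 (pvPairOf s).1 (pvPairOf s).2) := by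
  obtain ⟨a, b, hab⟩ := pvLen2 h
  simp [pvStepA, pvPairOf, hab]

lemma pvStepB_eq (st : PySem.Set (String × String) × PySem.Dict String (PySem.Set String))
    (s : String) (h : (PySem.Str.split₀ s).length = 2) :
    pvStepB st s = (PySem.Set.add st.1 (pvPairOf s), pvUpdRepB st.2 (pvPairOf s).1 (pvPairOf s).2) := by
  obtain ⟨a, b, hab⟩ := pvLen2 h
  simp [pvStepB, pvPairOf, hab]

-- B's setdefault-then-add is A's if/else update
lemma pvUpdRepB_eq (d : PySem.Dict String (PySem.Set String)) (a b : String) :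
    pvUpdRepB d a b = pvUpdRepDict d a b := by
  unfold pvUpdRepB pvUpdRepDict
  by_cases hc : d.contains b = true
  · rw [PySem.Dict.setdefault_of_contains _ _ hc]
    simp [hc]
  · have hc' : d.contains b = false := by simpa using hc
    rw [PySem.Dict.setdefault_of_not_contains _ _ hc']
    simp [hc, PySem.Dict.getD_insert_self, PySem.Dict.insert_insert_self]

lemma pvUpdId_getD (d : PySem.Dict String (PySem.Set String)) (a b x : String) :
    (pvUpdIdDict d a b).getD x PySem.Set.empty
      = if a = x then PySem.Set.add (d.getD x PySem.Set.empty) b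
        else d.getD x PySem.Set.empty := by
  by_cases hx : a = x
  · subst hx
    by_cases hc : d.contains a = true
    · simp [pvUpdIdDict, hc, PySem.Dict.getD_insert_self]
    · have hc' : d.contains a = false := by simpa using hc
      simp [pvUpdIdDict, hc, PySem.Dict.getD_insert_self,
        PySem.Dict.getD_of_not_contains _ _ hc']
  · have hx' : ¬ x = a := fun h => hx h.symm
    by_cases hc : d.contains a = true <;>
      simp [pvUpdIdDict, hc, PySem.Dict.getD_insert, hx', hx]

-- generic: folding updates keyed by (key p), adding (val p), updates the set at x
-- with the values of the matching pairs
lemma pvGetD_fold (key val : String × String → String) (x : String) :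
    ∀ (l : List (String × String)) (d : PySem.Dict String (PySem.Set String)),
      ((l.foldl (fun d p => pvUpdIdDict d (key p) (val p)) d).getD x PySem.Set.empty)
        = PySem.Set.update (d.getD x PySem.Set.empty)
            ((l.filter (fun p => key p == x)).map val) := by
  intro l
  induction l with
  | nil => intro d; simp [PySem.Set.update_nil]
  | cons p rest ih =>
      intro d
      simp only [List.foldl_cons]
      rw [ih, pvUpdId_getD]
      by_cases hp : key p = x
      · rw [if_pos hp]
        simp [List.filter_cons, hp, PySem.Set.update_cons]
      · rw [if_neg hp]
        simp [List.filter_cons, hp]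

-- id_dict after A's loop (from empty): the set of targets reported by x
def pvIdd (ps : List (String × String)) : PySem.Dict String (PySem.Set String) :=
  ps.foldl (fun d p => pvUpdIdDict d p.1 p.2) PySem.Dict.empty

-- report_dict after A's loop (from empty): the set of reporters of t
def pvRd (ps : List (String × String)) : PySem.Dict String (PySem.Set String) :=
  ps.foldl (fun d p => pvUpdRepDict d p.1 p.2) PySem.Dict.empty

lemma pvIdd_getD (ps : List (String × String)) (x : String) :
    (pvIdd ps).getD x PySem.Set.empty = PySem.Set.ofList (pvT ps x) := by
  have h := pvGetD_fold (fun p => p.1) (fun p => p.2) x ps PySem.Dict.empty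
  rw [PySem.Dict.getD_empty, PySem.Set.update_empty] at h
  exact h

lemma pvRd_getD (ps : List (String × String)) (t : String) :
    (pvRd ps).getD t PySem.Set.empty = PySem.Set.ofList (pvR ps t) := by
  have h := pvGetD_fold (fun p => p.2) (fun p => p.1) t ps PySem.Dict.empty
  rw [PySem.Dict.getD_empty, PySem.Set.update_empty] at h
  exact h

lemma pvUpdRep_insert (d : PySem.Dict String (PySem.Set String)) (a b : String) :
    pvUpdRepDict d a b
      = d.insert b (if d.contains b then PySem.Set.add (d.getD b PySem.Set.empty) a
                    else PySem.Set.add PySem.Set.empty a) := by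
  by_cases hc : d.contains b = true <;> simp [pvUpdRepDict, hc]

lemma pvRd_nodup (ps : List (String × String)) : (pvRd ps).keys.Nodup := by
  have hfun : (fun (d : PySem.Dict String (PySem.Set String)) (p : String × String) =>
      pvUpdRepDict d p.1 p.2)
      = (fun d p => d.insert p.2
          (if d.contains p.2 then PySem.Set.add (d.getD p.2 PySem.Set.empty) p.1
           else PySem.Set.add PySem.Set.empty p.1)) := by
    funext d p
    exact pvUpdRep_insert d p.1 p.2
  rw [pvRd, hfun]
  exact PySem.Dict.nodup_keys_foldl_insert_key ps (fun p => p.2) _ _ PySem.Dict.nodup_keys_empty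

lemma pvGetD_count (q : String → Bool) (x : String) :
    ∀ (l : List (String × String)) (c : PySem.Dict String Int),
      ((l.foldl (fun c pr => if q pr.2 then c.insert pr.1 (c.getD pr.1 0 + 1) else c) c).getD x 0)
        = c.getD x 0 + ((l.filter (fun p => p.1 == x && q p.2)).length : Int) := by
  intro l
  induction l with
  | nil => intro c; simp
  | cons p rest ih =>
      intro c
      simp only [List.foldl_cons]
      by_cases hq : q p.2 = true
      · rw [if_pos hq, ih]
        by_cases hx : p.1 = x
        · subst hx
          rw [PySem.Dict.getD_insert_self]
          simp [List.filter_cons, hq]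
          push_cast
          ring
        · have hx' : ¬ x = p.1 := fun h => hx h.symm
          rw [PySem.Dict.getD_insert, if_neg hx']
          simp [List.filter_cons, hx, hq]
      · rw [if_neg hq, ih]
        have hq' : q p.2 = false := by simpa using hq
        simp [List.filter_cons, hq']

lemma pvFoldCount (q : String → Bool) :
    ∀ (l : List String) (c : Int),
      l.foldl (fun c t => if q t then c + 1 else c) c = c + ((l.filter q).length : Int) := by
  intro l
  induction l with
  | nil => intro c; simp
  | cons t rest ih =>
      intro c
      by_cases hq : q t = true
      · rw [List.foldl_cons, if_pos hq, ih]
        simp [List.filter_cons, hq]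
        ring
      · have hq' : q t = false := by simpa using hq
        rw [List.foldl_cons, if_neg hq, ih]
        simp [List.filter_cons, hq']

-- set(...) commutes with filter (first occurrences are preserved)
lemma pvOfList_filter {α : Type} [BEq α] [LawfulBEq α] (q : α → Bool) (xs : List α) :
    PySem.Set.ofList (xs.filter q) = (PySem.Set.ofList xs).filter q := by
  induction xs using List.reverseRecOn with
  | nil => simp
  | append_singleton xs x ih =>
      rw [List.filter_append, PySem.Set.ofList_append_singleton]
      by_cases hq : q x = true
      · have hsing : List.filter q [x] = [x] := by simp [hq]
        rw [hsing, PySem.Set.ofList_append_singleton, ih]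
        by_cases hm : x ∈ PySem.Set.ofList xs
        · rw [PySem.Set.add_of_mem hm, PySem.Set.add_of_mem]
          simp [List.mem_filter, hm, hq]
        · rw [PySem.Set.add_of_not_mem hm, PySem.Set.add_of_not_mem, List.filter_append]
          · simp [hq]
          · simp [List.mem_filter, hm]
      · have hq' : q x = false := by simpa using hq
        have hsing : List.filter q [x] = [] := by simp [hq']
        rw [hsing, List.append_nil, ih]
        by_cases hm : x ∈ PySem.Set.ofList xs
        · rw [PySem.Set.add_of_mem hm]
        · rw [PySem.Set.add_of_not_mem hm, List.filter_append]
          simp [hq']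

-- set(...) commutes with an injective map
lemma pvOfList_map {α β : Type} [BEq α] [LawfulBEq α] [BEq β] [LawfulBEq β]
    (f : α → β) (hf : ∀ x y, f x = f y → x = y) (xs : List α) :
    PySem.Set.ofList (xs.map f) = (PySem.Set.ofList xs).map f := by
  induction xs using List.reverseRecOn with
  | nil => simp
  | append_singleton xs x ih =>
      have hmap : (xs ++ [x]).map f = xs.map f ++ [f x] := by simp
      rw [hmap, PySem.Set.ofList_append_singleton, PySem.Set.ofList_append_singleton, ih]
      by_cases hm : x ∈ PySem.Set.ofList xs
      · rw [PySem.Set.add_of_mem hm, PySem.Set.add_of_mem (List.mem_map_of_mem hm)]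
      · rw [PySem.Set.add_of_not_mem hm, PySem.Set.add_of_not_mem, List.map_append]
        · simp
        · intro hmem
          obtain ⟨y, hy, hxy⟩ := List.mem_map.mp hmem
          exact hm (hf y x hxy ▸ hy)

-- a pair list whose first components are all id is the map (id, ·) of its seconds
lemma pvFstConst (id : String) :
    ∀ (l : List (String × String)), (∀ p ∈ l, p.1 = id) →
      l = (l.map (·.2)).map (fun t => (id, t)) := by
  intro l
  induction l with
  | nil => intro _; rfl
  | cons p rest ih =>
      intro h
      obtain ⟨a, b⟩ := p
      have hp : a = id := h (a, b) (by simp)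
      subst hp
      simp only [List.map_cons]
      rw [← ih (fun q hq => h q (List.mem_cons_of_mem _ hq))]

-- membership in B's banned set is A's length test, for targets that have a reporter
lemma pvBannedContains (d : PySem.Dict String (PySem.Set String)) (k : Int) (t : String)
    (hnd : d.keys.Nodup) (h : d.getD t PySem.Set.empty ≠ PySem.Set.empty) :
    PySem.Set.contains
        (PySem.Set.ofList ((d.items.filter (fun ts => PySem.Set.len ts.2 ≥ k)).map (·.1))) t
      = decide (PySem.Set.len (d.getD t PySem.Set.empty) ≥ k) := by
  have hget : d.get? t = some (d.getD t PySem.Set.empty) := by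
    cases hg : d.get? t with
    | none => exact absurd (PySem.Dict.getD_of_get?_eq_none _ _ hg) h
    | some v => rw [PySem.Dict.getD_of_get?_eq_some _ _ hg]
  by_cases hk : PySem.Set.len (d.getD t PySem.Set.empty) ≥ k
  · have hmem : t ∈ ((d.items.filter (fun ts => PySem.Set.len ts.2 ≥ k)).map (·.1)) := by
      refine List.mem_map.mpr ⟨(t, d.getD t PySem.Set.empty), ?_, rfl⟩
      refine List.mem_filter.mpr ⟨?_, by simpa using hk⟩
      exact PySem.Dict.mem_items_of_get?_eq_some _ hget
    have hc : PySem.Set.contains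
        (PySem.Set.ofList ((d.items.filter (fun ts => PySem.Set.len ts.2 ≥ k)).map (·.1))) t
        = true := (PySem.Set.contains_iff _ _).mpr ((PySem.Set.mem_ofList _ _).mpr hmem)
    rw [hc]
    have : decide (PySem.Set.len (d.getD t PySem.Set.empty) ≥ k) = true := by simpa using hk
    rw [this]
  · have hnm : t ∉ ((d.items.filter (fun ts => PySem.Set.len ts.2 ≥ k)).map (·.1)) := by
      intro hmem
      obtain ⟨⟨t', s⟩, hin, ht'⟩ := List.mem_map.mp hmem
      obtain ⟨hitems, hlen⟩ := List.mem_filter.mp hin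
      have ht2 : t' = t := ht'
      subst ht2
      have hgs : d.get? t' = some s := PySem.Dict.get?_of_mem_items _ hitems hnd
      rw [hget] at hgs
      cases hgs
      exact hk (by simpa using hlen)
    have hc : PySem.Set.contains
        (PySem.Set.ofList ((d.items.filter (fun ts => PySem.Set.len ts.2 ≥ k)).map (·.1))) t
        = false := by
      simp only [Bool.eq_false_iff, Ne]
      intro hcc
      exact hnm ((PySem.Set.mem_ofList _ _).mp ((PySem.Set.contains_iff _ _).mp hcc))
    rw [hc]
    have : decide (PySem.Set.len (d.getD t PySem.Set.empty) ≥ k) = false := by simpa using hk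
    rw [this]

-- A's answer loop appends one count per id
lemma pvFoldAppend (g : String → Int) :
    ∀ (l : List String) (acc : List Int),
      l.foldl (fun ans i => ans ++ [g i]) acc = acc ++ l.map g := by
  intro l
  induction l with
  | nil => intro acc; simp
  | cons i rest ih => intro acc; simp [List.foldl_cons, ih]

-- B's banned set, over the pair list
def pvBanned (ps : List (String × String)) (k : Int) : PySem.Set String :=
  PySem.Set.ofList (((pvRd ps).items.filter (fun ts => PySem.Set.len ts.2 ≥ k)).map (·.1))

-- B's count dict, over the pair list
def pvCount (ps : List (String × String)) (k : Int) : PySem.Dict String Int :=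
  (PySem.Set.ofList ps).foldl
    (fun c pr => if PySem.Set.contains (pvBanned ps k) pr.2
                 then c.insert pr.1 (c.getD pr.1 0 + 1) else c)
    PySem.Dict.empty

-- the heart of the equivalence: per id, A's nested count equals B's counter lookup
lemma pvPerId (ps : List (String × String)) (k : Int) (id : String) :
    pvCntFor (pvRd ps) (pvIdd ps) k id = (pvCount ps k).getD id 0 := by
  have hRHS : (pvCount ps k).getD id 0
      = (((PySem.Set.ofList (pvT ps id)).filter
            (fun t => PySem.Set.contains (pvBanned ps k) t)).length : Int) := by
    rw [pvCount, pvGetD_count (fun t => PySem.Set.contains (pvBanned ps k) t) id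
      (PySem.Set.ofList ps) PySem.Dict.empty, PySem.Dict.getD_empty]
    have hcomm : List.filter
        (fun p => p.1 == id && PySem.Set.contains (pvBanned ps k) p.2)
        (PySem.Set.ofList ps)
        = List.filter (fun p => PySem.Set.contains (pvBanned ps k) p.2)
            (List.filter (fun p => p.1 == id) (PySem.Set.ofList ps)) := by
      rw [List.filter_filter]
      exact List.filter_congr (fun a _ => Bool.and_comm _ _)
    rw [hcomm, show List.filter (fun p => p.1 == id) (PySem.Set.ofList ps)
        = PySem.Set.ofList (List.filter (fun p => p.1 == id) ps) from
      (pvOfList_filter _ _).symm]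
    have h3 : List.filter (fun p => p.1 == id) ps
        = (pvT ps id).map (fun t => (id, t)) := by
      refine pvFstConst id (List.filter (fun p => p.1 == id) ps) ?_
      intro p hp
      have hmem := List.mem_filter.mp hp
      simpa using hmem.2
    rw [h3, pvOfList_map (fun t => (id, t)) (fun x y hxy => by simpa using hxy),
      List.filter_map, List.length_map]
    simp [Function.comp_def]
  rw [hRHS]
  by_cases hc : (pvIdd ps).contains id = true
  · rw [pvCntFor, if_pos hc, pvIdd_getD]
    have hqq : ∀ t ∈ PySem.Set.ofList (pvT ps id),
        (decide (PySem.Set.len ((pvRd ps).getD t PySem.Set.empty) ≥ k))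
          = PySem.Set.contains (pvBanned ps k) t := by
      intro t ht
      have hne : (pvRd ps).getD t PySem.Set.empty ≠ PySem.Set.empty := by
        rw [pvRd_getD]
        have ht' : t ∈ pvT ps id := (PySem.Set.mem_ofList _ _).mp ht
        unfold pvT at ht'
        obtain ⟨p, hpmem, hpt⟩ := List.mem_map.mp ht'
        have hpf := List.mem_filter.mp hpmem
        have hp2 : p ∈ ps.filter (fun p => p.2 == t) :=
          List.mem_filter.mpr ⟨hpf.1, by simpa using hpt⟩
        exact List.ne_nil_of_mem
          ((PySem.Set.mem_ofList _ _).mpr (List.mem_map_of_mem hp2))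
      have hb := pvBannedContains (pvRd ps) k t (pvRd_nodup ps) hne
      rw [pvBanned]
      exact hb.symm
    have hfold := pvFoldCount
      (fun t => decide (PySem.Set.len ((pvRd ps).getD t PySem.Set.empty) ≥ k))
      (PySem.Set.ofList (pvT ps id)) 0
    simp only [decide_eq_true_eq] at hfold
    rw [hfold, zero_add, List.filter_congr hqq]
  · have hc' : (pvIdd ps).contains id = false := by simpa using hc
    rw [pvCntFor, if_neg (by simp [hc'])]
    have h0 : PySem.Set.ofList (pvT ps id) = ([] : List String) := by
      rw [← pvIdd_getD]
      exact PySem.Dict.getD_of_not_contains _ _ hc'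
    rw [h0]
    simp

theorem solution_spec : Claim_equal_solution := by
  intro id_list report k _ hpre
  unfold Spec_solution solution solution_alt
  have hA : report.foldl pvStepA (PySem.Dict.empty, PySem.Dict.empty)
      = (pvRd (report.map pvPairOf), pvIdd (report.map pvPairOf)) := by
    rw [pvFoldSplit
        (fun st p => (pvUpdRepDict st.1 p.1 p.2, pvUpdIdDict st.2 p.1 p.2))
        pvStepA pvStepA_eq report _ hpre]
    exact PySem.List.foldl_prod_mk
      (f := fun d (p : String × String) => pvUpdRepDict d p.1 p.2)
      (g := fun d (p : String × String) => pvUpdIdDict d p.1 p.2)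
      (report.map pvPairOf) PySem.Dict.empty PySem.Dict.empty
  have hB : report.foldl pvStepB (PySem.Set.empty, PySem.Dict.empty)
      = (PySem.Set.ofList (report.map pvPairOf), pvRd (report.map pvPairOf)) := by
    rw [pvFoldSplit
        (fun st p => (PySem.Set.add st.1 p, pvUpdRepB st.2 p.1 p.2))
        pvStepB pvStepB_eq report _ hpre]
    have hfun : (fun (d : PySem.Dict String (PySem.Set String)) (p : String × String) =>
        pvUpdRepB d p.1 p.2) = (fun d p => pvUpdRepDict d p.1 p.2) := by
      funext d p
      exact pvUpdRepB_eq d p.1 p.2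
    have h2 := PySem.List.foldl_prod_mk
      (f := fun (s : PySem.Set (String × String)) (p : String × String) => PySem.Set.add s p)
      (g := fun d (p : String × String) => pvUpdRepB d p.1 p.2)
      (report.map pvPairOf) PySem.Set.empty PySem.Dict.empty
    rw [h2]
    have e1 : List.foldl (fun (s : PySem.Set (String × String)) p => s.add p)
        PySem.Set.empty (report.map pvPairOf) = PySem.Set.ofList (report.map pvPairOf) :=
      (PySem.Set.ofList_eq_foldl _).symm
    have e2 : List.foldl (fun d (p : String × String) => pvUpdRepB d p.1 p.2)
        PySem.Dict.empty (report.map pvPairOf) = pvRd (report.map pvPairOf) := by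
      rw [hfun]; rfl
    rw [e1, e2]
  rw [hA, hB, pvFoldAppend (fun id => pvCntFor (pvRd (report.map pvPairOf))
    (pvIdd (report.map pvPairOf)) k id), List.nil_append]
  refine List.map_congr_left ?_
  intro id _
  exact pvPerId (report.map pvPairOf) k id
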